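-- pv_equiv track=rewrite | github.com/unlikelymaths/tomef | tokenizer/default_tokenizer.py | split_numbers_word
-- ===== SOURCE A (Python) =====
-- def split_numbers_word(word):
--     words = []
--     current_word = word[0]
--     current_word_isdecimal = current_word.isdecimal()
--     ignore_in_decimal = [",","."]
--     ignore_count = 0 # counts how many consecutive ignore_in_decimal characters have appeared
--     for char in word[1:]:
--         if char.isdecimal() != current_word_isdecimal:
--             if current_word_isdecimal and char in ignore_in_decimal and ignore_count == 0:
--                 ignore_count += 1
--                 current_word += char
--             else:
--                 if ignore_count:
--                     current_word = current_word[:-ignore_count]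
--                     ignore_count = 0
--                 words.append(current_word)
--                 current_word = char
--                 current_word_isdecimal = current_word.isdecimal()
--         else:
--             ignore_count = 0
--             current_word += char
--
--     if ignore_count:
--         current_word = current_word[:-ignore_count]
--     words.append(current_word)
--     return words
-- ===== SOURCE B (Python) =====
-- from itertools import groupby
--
--
-- def split_numbers_word(word):
--     # Group the word into maximal runs of decimal / non-decimal characters,
--     # then reconcile the runs: merge number runs joined by a single ','/'.'
--     # and drop a leading ','/'.' of a non-decimal run that follows a number.
--     runs = [''.join(g) for _, g in groupby(word, key=str.isdecimal)]
--     return _go(runs, False)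
--
--
-- def _go(runs, after_number):
--     if not runs:
--         return []
--     run = runs[0]
--     if run[0].isdecimal():
--         return _merge(run, runs[1:])
--     if after_number and run[0] in (',', '.'):
--         run = run[1:]
--     return ([run] if run else []) + _go(runs[1:], False)
--
--
-- def _merge(num, rest):
--     if len(rest) >= 2 and rest[0] in (',', '.') and rest[1][0].isdecimal():
--         return _merge(num + rest[0] + rest[1], rest[2:])
--     return [num] + _go(rest, True)
-- ===== Notes on version B (the rewrite author's own statement) =====
-- stated objective: alternative
-- what changed: B first splits the word into maximal decimal/non-decimal runs with itertools.groupby and then reconciles the run list (merging digit runs joined by a single ','/'.' and dropping a leading separator of a run that follows a number), instead of A's single char-by-char state machine with an ignore counter.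
import Mathlib
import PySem

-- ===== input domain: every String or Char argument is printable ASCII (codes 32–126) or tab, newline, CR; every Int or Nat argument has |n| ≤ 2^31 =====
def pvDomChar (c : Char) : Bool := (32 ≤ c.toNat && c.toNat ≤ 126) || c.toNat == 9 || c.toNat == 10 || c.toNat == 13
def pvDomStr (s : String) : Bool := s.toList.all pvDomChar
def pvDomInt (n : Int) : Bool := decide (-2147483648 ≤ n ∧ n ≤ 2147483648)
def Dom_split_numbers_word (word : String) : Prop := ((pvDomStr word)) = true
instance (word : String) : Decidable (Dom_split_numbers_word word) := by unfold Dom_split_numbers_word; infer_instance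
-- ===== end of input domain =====

-- B replaces A's char-by-char state machine by a groupby-into-runs pass plus a run-reconciliation
-- pass (alternative decomposition, same cost); A raises IndexError on "" (excluded by Pre_).


-- ===== PORT A =====
-- str.isdecimal: on the ASCII domain this is exactly '0'..'9'
def pvIsDec (c : Char) : Bool := c.isDigit

-- one step of A's loop; state = (words, current_word, current_word_isdecimal, ignore_count)
def pvStepA (st : List (List Char) × List Char × Bool × Nat) (char : Char) :
    List (List Char) × List Char × Bool × Nat :=
  match st with
  | (words, cur, flag, ign) =>
    if pvIsDec char != flag then
      if flag && (char == ',' || char == '.') && (ign == 0) then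
        (words, cur ++ [char], flag, ign + 1)
      else
        let cur' := if ign != 0 then cur.take (cur.length - ign) else cur
        (words ++ [cur'], [char], pvIsDec char, 0)
    else
      (words, cur ++ [char], flag, 0)

-- A's code after the loop: strip the pending separator, append current_word
def pvFinishA (st : List (List Char) × List Char × Bool × Nat) : List (List Char) :=
  match st with
  | (words, cur, _, ign) =>
    let cur' := if ign != 0 then cur.take (cur.length - ign) else cur
    words ++ [cur']

def split_numbers_word (word : String) : List String :=
  match word.toList with
  | [] => []   -- Python raises IndexError on word[0]; excluded by Pre_
  | c0 :: rest =>
    (pvFinishA (rest.foldl pvStepA ([], [c0], pvIsDec c0, 0))).map String.ofList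

-- ===== PORT B =====
-- itertools.groupby over the characters keyed by str.isdecimal
def pvRuns : List Char → List (List Char)
  | [] => []
  | c :: cs =>
    match pvRuns cs with
    | [] => [[c]]
    | r :: rs =>
      if pvIsDec c == pvIsDec (r.headD ' ') then (c :: r) :: rs else [c] :: r :: rs

mutual
-- _go from Source B
def pvGo : List (List Char) → Bool → List (List Char)
  | [], _ => []
  | run :: rest, afterNum =>
    if pvIsDec (run.headD ' ') then pvMerge run rest
    else
      let run' := if afterNum && (run.headD ' ' == ',' || run.headD ' ' == '.') then run.tail else run
      (if run' = [] then [] else [run']) ++ pvGo rest false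
termination_by runs _ => (runs.length, 1)

-- _merge from Source B
def pvMerge : List Char → List (List Char) → List (List Char)
  | num, s :: d :: rest =>
    if (s = [','] ∨ s = ['.']) ∧ pvIsDec (d.headD ' ') then
      pvMerge (num ++ s ++ d) rest
    else
      num :: pvGo (s :: d :: rest) true
  | num, rest => num :: pvGo rest true
termination_by _ rest => (rest.length, 2)
end

def split_numbers_word_alt (word : String) : List String :=
  (pvGo (pvRuns word.toList) false).map String.ofList

-- ===== PRECONDITION & SPEC =====
-- A raises IndexError on the empty string (it reads word[0]); that is the only excluded input.
def Pre_split_numbers_word (word : String) : Prop := word.toList ≠ []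
instance (word : String) : Decidable (Pre_split_numbers_word word) := by
  unfold Pre_split_numbers_word; infer_instance
def pvWitness_split_numbers_word : String := "12.5cm"

def Spec_split_numbers_word (word : String) (out : List String) : Prop := out = split_numbers_word_alt word
instance (word : String) (out : List String) : Decidable (Spec_split_numbers_word word out) := by unfold Spec_split_numbers_word; infer_instance

-- ===== CLAIM (what is proved, stated in full; the proofs are below) =====
def Claim_equal_split_numbers_word : Prop := ∀ (word : String), Dom_split_numbers_word word → Pre_split_numbers_word word → Spec_split_numbers_word word (split_numbers_word word)

-- ===== LEMMAS AND PROOFS =====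

-- runs alternate in decimality; `Chain b rs` says rs is the run list following a token of decimality b
inductive Chain : Bool → List (List Char) → Prop
  | nil (b : Bool) : Chain b []
  | cons (b : Bool) (r : List Char) (rs : List (List Char)) :
      r ≠ [] → (∀ c ∈ r, pvIsDec c = !b) → Chain (!b) rs → Chain b (r :: rs)

-- characters of the same decimality as the current run are simply appended by A's loop
theorem foldl_absorb (l : List Char) (b : Bool) (words : List (List Char)) (cur : List Char)
    (h : ∀ c ∈ l, pvIsDec c = b) :
    List.foldl pvStepA (words, cur, b, 0) l = (words, cur ++ l, b, 0) := by
  induction l generalizing cur with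
  | nil => simp
  | cons c l ih =>
    have hc : pvIsDec c = b := h c (by simp)
    have hl : ∀ x ∈ l, pvIsDec x = b := fun x hx => h x (by simp [hx])
    simp only [List.foldl_cons, pvStepA, hc, bne_self_eq_false, Bool.false_eq_true, if_false]
    rw [ih _ hl]; simp

-- the central invariant: A's loop over the flattened remaining runs, started on a finished
-- token of decimality b, produces exactly B's run reconciliation
theorem main_lemma (n : Nat) : ∀ (runs : List (List Char)), runs.length ≤ n →
    ∀ (b : Bool) (words : List (List Char)) (cur : List Char), Chain b runs →
    pvFinishA (List.foldl pvStepA (words, cur, b, 0) runs.flatten) =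
      words ++ (if b then pvMerge cur runs else cur :: pvGo runs false) := by
  induction n with
  | zero =>
    intro runs hlen b words cur _
    cases runs with
    | nil => cases b <;> simp [pvFinishA, pvMerge, pvGo]
    | cons r rs => simp at hlen
  | succ n ih =>
    intro runs hlen b words cur hchain
    cases hchain with
    | nil => cases b <;> simp [pvFinishA, pvMerge, pvGo]
    | cons _ r rs hne huni hch =>
      have hlen' : rs.length ≤ n := by simp [List.length_cons] at hlen; omega
      obtain ⟨c, t, rfl⟩ : ∃ c t, r = c :: t := by
        cases r with
        | nil => exact absurd rfl hne
        | cons c t => exact ⟨c, t, rfl⟩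
      have hc : pvIsDec c = !b := huni c (by simp)
      have ht : ∀ x ∈ t, pvIsDec x = !b := fun x hx => huni x (by simp [hx])
      cases b with
      | false =>
        have hc' : pvIsDec c = true := by simpa using hc
        have ht' : ∀ x ∈ t, pvIsDec x = true := by simpa using ht
        have hch' : Chain true rs := by simpa using hch
        rw [List.flatten_cons, List.foldl_append, List.foldl_cons]
        have hstep : pvStepA (words, cur, false, 0) c = (words ++ [cur], [c], true, 0) := by
          simp [pvStepA, hc']
        rw [hstep, foldl_absorb t true (words ++ [cur]) [c] ht',
            ih rs hlen' true (words ++ [cur]) ([c] ++ t) hch']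
        simp [pvGo, hc']
      | true =>
        have hc' : pvIsDec c = false := by simpa using hc
        have ht' : ∀ x ∈ t, pvIsDec x = false := by simpa using ht
        have hch' : Chain false rs := by simpa using hch
        rw [List.flatten_cons, List.foldl_append, List.foldl_cons]
        by_cases hsep : c = ',' ∨ c = '.'
        · -- a possible decimal separator right after a number: A sets ignore_count = 1
          have hsepb : (c == ',' || c == '.') = true := by
            rcases hsep with rfl | rfl <;> simp
          have hstep : pvStepA (words, cur, true, 0) c = (words, cur ++ [c], true, 1) := by
            simp [pvStepA, hc', hsepb]
          rw [hstep]
          cases t with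
          | nil =>
            cases hch' with
            | nil =>
              -- trailing separator: stripped by A, dropped by B
              simp [pvFinishA, pvMerge, pvGo, hc', hsepb]
            | cons _ d rs' hdne hduni hch'' =>
              -- separator between two numbers: merged by both
              obtain ⟨e, u, rfl⟩ : ∃ e u, d = e :: u := by
                cases d with
                | nil => exact absurd rfl hdne
                | cons e u => exact ⟨e, u, rfl⟩
              have he : pvIsDec e = true := by simpa using hduni e (by simp)
              have hu : ∀ x ∈ u, pvIsDec x = true := by
                intro x hx; simpa using hduni x (by simp [hx])
              have hch₃ : Chain true rs' := by simpa using hch''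
              have hlen'' : rs'.length ≤ n := by simp [List.length_cons] at hlen'; omega
              rw [List.foldl_nil, List.flatten_cons, List.foldl_append, List.foldl_cons]
              have hstep2 : pvStepA (words, cur ++ [c], true, 1) e = (words, cur ++ [c] ++ [e], true, 0) := by
                simp [pvStepA, he]
              rw [hstep2, foldl_absorb u true words (cur ++ [c] ++ [e]) hu,
                  ih rs' hlen'' true words (cur ++ [c] ++ [e] ++ u) hch₃]
              rcases hsep with rfl | rfl <;> simp [pvMerge, he]
          | cons c2 t' =>
            -- separator followed by more non-digits: A strips it, B drops the run's first char
            have hc2 : pvIsDec c2 = false := ht' c2 (by simp)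
            have ht'' : ∀ x ∈ t', pvIsDec x = false := fun x hx => ht' x (by simp [hx])
            rw [List.foldl_cons]
            have hstep2 : pvStepA (words, cur ++ [c], true, 1) c2 = (words ++ [cur], [c2], false, 0) := by
              simp [pvStepA, hc2]
            rw [hstep2, foldl_absorb t' false (words ++ [cur]) [c2] ht'',
                ih rs hlen' false (words ++ [cur]) ([c2] ++ t') hch']
            cases rs with
            | nil => simp [pvMerge, pvGo, hc', hsepb]
            | cons d rs' => simp [pvMerge, pvGo, hc', hsepb]
        · -- ordinary end of a number
          obtain ⟨hs1, hs2⟩ := not_or.mp hsep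
          have hsepb : (c == ',' || c == '.') = false := by
            simp [hs1, hs2]
          have hstep : pvStepA (words, cur, true, 0) c = (words ++ [cur], [c], false, 0) := by
            simp [pvStepA, hc', hsepb]
          rw [hstep, foldl_absorb t false (words ++ [cur]) [c] ht',
              ih rs hlen' false (words ++ [cur]) ([c] ++ t) hch']
          cases rs with
          | nil => simp [pvMerge, pvGo, hc', hsepb, hs1, hs2]
          | cons d rs' => simp [pvMerge, pvGo, hc', hsepb, hs1, hs2]

-- pvRuns produces the maximal-run decomposition: head run starts at the first character,
-- runs are uniform, nonempty and alternating
theorem pvRuns_good (cs : List Char) : ∀ (c : Char), ∃ t rs,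
    pvRuns (c :: cs) = (c :: t) :: rs ∧ cs = t ++ rs.flatten ∧
    (∀ x ∈ t, pvIsDec x = pvIsDec c) ∧ Chain (pvIsDec c) rs := by
  induction cs with
  | nil => intro c; exact ⟨[], [], by simp [pvRuns], by simp, by simp, Chain.nil _⟩
  | cons d cs ih =>
    intro c
    obtain ⟨t, rs, h1, h2, h3, h4⟩ := ih d
    have e : pvRuns (c :: d :: cs) =
        match pvRuns (d :: cs) with
        | [] => [[c]]
        | r :: rs' => if pvIsDec c == pvIsDec (r.headD ' ') then (c :: r) :: rs' else [c] :: r :: rs' := rfl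
    by_cases hcd : pvIsDec c = pvIsDec d
    · refine ⟨d :: t, rs, ?_, ?_, ?_, ?_⟩
      · rw [e, h1]; simp [hcd]
      · simp [h2]
      · intro x hx
        rcases List.mem_cons.mp hx with rfl | h
        · simp [hcd]
        · rw [h3 x h, hcd]
      · rw [hcd]; exact h4
    · refine ⟨[], (d :: t) :: rs, ?_, ?_, by simp, ?_⟩
      · rw [e, h1]; simp [hcd]
      · simp [h2]
      · have hd : pvIsDec d = !(pvIsDec c) := by
          cases hb : pvIsDec c <;> cases hb' : pvIsDec d <;> simp_all
        refine Chain.cons _ _ _ (by simp) ?_ ?_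
        · intro x hx
          rcases List.mem_cons.mp hx with rfl | h
          · rw [← hd]
          · rw [h3 x h, hd]
        · rw [← hd]; exact h4

-- ===== VERDICT (by name: the statement is the Claim_ definition above) =====
theorem split_numbers_word_spec : Claim_equal_split_numbers_word := by
  intro word _ hpre
  unfold Spec_split_numbers_word split_numbers_word split_numbers_word_alt
  cases h : word.toList with
  | nil => exact absurd h hpre
  | cons c cs =>
    obtain ⟨t, rs, h1, h2, h3, h4⟩ := pvRuns_good cs c
    subst h2
    rw [h1]
    show (pvFinishA (List.foldl pvStepA ([], [c], pvIsDec c, 0) (t ++ rs.flatten))).map String.ofList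
        = (pvGo ((c :: t) :: rs) false).map String.ofList
    rw [List.foldl_append, foldl_absorb t (pvIsDec c) [] [c] h3,
        main_lemma rs.length rs le_rfl (pvIsDec c) [] ([c] ++ t) h4]
    cases hb : pvIsDec c with
    | true => simp [pvGo, hb]
    | false => simp [pvGo, hb]
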